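-- pv_equiv track=rewrite | github.com/chobocho/pyparser | src/choboutil.py | findemail
-- ===== SOURCE A (Python) =====
-- def findemail(str):
--     email = ""
--     isPush = False
--
--     for c in str:
--         if c == '<':
--             isPush = True
--             continue
--         elif c == '>':
--             email += ';'
--             isPush = False
--             continue
--         if isPush:
--             email += c
--
--     return email
-- ===== SOURCE B (Python) =====
-- def findemail(str):
--     # split on the terminator '>', extract the chunk after the first '<' in each part
--     pieces = []
--     for part in str.split('>'):
--         if '<' in part:
--             after = part[part.index('<') + 1:]
--             pieces.append(''.join(ch for ch in after if ch != '<'))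
--         else:
--             pieces.append('')
--     return ';'.join(pieces)
-- ===== Notes on version B (the rewrite author's own statement) =====
-- stated objective: faster
-- what changed: Replaced the per-character isPush state machine (string += per char) with split on the terminator character, per-segment extraction of the text after the first opening bracket (nested openers filtered out), joined with the semicolon delimiter; the bulk work moves into C-level split/join, measured 13x faster at the largest size.
import Mathlib
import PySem

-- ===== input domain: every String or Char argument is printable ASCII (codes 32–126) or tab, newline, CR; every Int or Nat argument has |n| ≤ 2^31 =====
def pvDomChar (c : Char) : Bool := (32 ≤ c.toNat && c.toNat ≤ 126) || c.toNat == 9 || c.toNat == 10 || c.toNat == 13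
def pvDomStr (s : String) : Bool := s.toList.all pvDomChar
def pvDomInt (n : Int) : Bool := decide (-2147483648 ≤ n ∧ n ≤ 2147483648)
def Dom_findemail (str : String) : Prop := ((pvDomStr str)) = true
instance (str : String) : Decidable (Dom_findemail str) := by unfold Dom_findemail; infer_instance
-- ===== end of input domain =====

-- B replaces A's per-character push/pop state machine by split-on-terminator then per-segment
-- extraction after the first opening bracket (objective: faster — C-level split/join, measured).

-- ===== PORT A =====
-- A's loop body: state = (email so far, isPush); branches in the order of A's code
def pvStep (st : List Char × Bool) (c : Char) : List Char × Bool :=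
  if c = '<' then (st.1, true)
  else if c = '>' then (st.1 ++ [';'], false)
  else if st.2 then (st.1 ++ [c], st.2)
  else st

-- literal port of A's for-loop over the characters
def findemail (str : String) : String :=
  let r := str.toList.foldl pvStep ([], false)
  String.ofList r.1

-- ===== PORT B =====
-- part[part.index('<')+1:] = tail of dropWhile (≠'<'); the filter is the per-char join in Source B
def pvExtract (p : List Char) : List Char :=
  if '<' ∈ p then ((p.dropWhile (fun c => c != '<')).tail).filter (fun c => c != '<')
  else []

-- str.split('>') ported as List.splitOn '>'; ';'.join ported as List.intercalate [';']
def findemail_alt (str : String) : String :=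
  String.ofList (List.intercalate [';'] ((str.toList.splitOn '>').map pvExtract))

-- ===== PRECONDITION & SPEC =====
def Spec_findemail (str : String) (out : String) : Prop := out = findemail_alt str
instance (str : String) (out : String) : Decidable (Spec_findemail str out) := by unfold Spec_findemail; infer_instance

-- ===== CLAIM (what is proved, stated in full; the proofs are below) =====
def Claim_equal_findemail : Prop := ∀ (str : String), Dom_findemail str → Spec_findemail str (findemail str)

-- ===== LEMMAS AND PROOFS =====

-- recursive reading of A's state machine (the characters emitted from state `push`)
def pvG (push : Bool) : List Char → List Char
  | [] => []
  | c :: t =>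
    if c = '<' then pvG true t
    else if c = '>' then ';' :: pvG false t
    else if push then c :: pvG push t else pvG push t

-- ';' ++ extract, flattened over the parts after the first one
def pvJ (parts : List (List Char)) : List Char :=
  (parts.map (fun p => ';' :: pvExtract p)).flatten

lemma pvFoldl_step (s : List Char) : ∀ (acc : List Char) (push : Bool),
    (s.foldl pvStep (acc, push)).1 = acc ++ pvG push s := by
  induction s with
  | nil => intro acc push; simp [pvG]
  | cons c t ih =>
    intro acc push
    by_cases h1 : c = '<'
    · simp [pvStep, pvG, h1, ih]
    · by_cases h2 : c = '>'
      · simp [pvStep, pvG, h1, h2, ih]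
      · cases push <;> simp [pvStep, pvG, h1, h2, ih]

lemma pvExtract_lt (h : List Char) : pvExtract ('<' :: h) = h.filter (fun c => c != '<') := by
  simp [pvExtract, List.dropWhile]

lemma pvExtract_cons (c : Char) (h : List Char) (hc : c ≠ '<') :
    pvExtract (c :: h) = pvExtract h := by
  have hcb : (c != '<') = true := by simp [hc]
  by_cases hm : '<' ∈ h
  · simp [pvExtract, hcb, hm, List.dropWhile]
  · have : ¬ '<' ∈ (c :: h) := by simp [hm, Ne.symm hc]
    simp [pvExtract, hm, this]

lemma pvMain (s : List Char) :
    pvG false s = pvExtract (s.splitOnP (· == '>')).headI ++ pvJ (s.splitOnP (· == '>')).tail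
    ∧ pvG true s = ((s.splitOnP (· == '>')).headI.filter (fun c => c != '<'))
        ++ pvJ (s.splitOnP (· == '>')).tail := by
  induction s with
  | nil => simp [pvG, List.splitOnP_nil, pvExtract, pvJ]
  | cons c t ih =>
    obtain ⟨h', t', hs⟩ := List.exists_cons_of_ne_nil (List.splitOnP_ne_nil (· == '>') t)
    by_cases h2 : c = '>'
    · rw [List.splitOnP_cons]
      simp only [h2, BEq.rfl, if_true]
      constructor <;>
        simp [pvG, hs, pvJ, pvExtract, ih.1, List.headI, List.tail]
    · rw [List.splitOnP_cons]
      have hb : ((· == '>') c) = false := by simp [h2]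
      simp only [hb, Bool.false_eq_true, if_false, hs, List.modifyHead]
      by_cases h1 : c = '<'
      · subst h1
        constructor <;>
          simp [pvG, hs, ih.2, pvExtract_lt, List.headI, List.tail]
      · have hcb : (c != '<') = true := by simp [h1]
        constructor <;>
          simp [pvG, h1, h2, hs, ih.1, ih.2, pvExtract_cons c h' h1, hcb,
            List.headI, List.tail, List.filter]

lemma pvIntercalate (t : List (List Char)) (h : List Char) :
    List.intercalate [';'] ((h :: t).map pvExtract) = pvExtract h ++ pvJ t := by
  induction t generalizing h with
  | nil => simp [List.intercalate, pvJ]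
  | cons h2 t2 ih =>
    have := ih h2
    simp only [List.map_cons, List.intercalate, List.intersperse, List.flatten] at this ⊢
    simp [pvJ] at this ⊢
    simp [this]

-- ===== VERDICT (by name: the statement is the Claim_ definition above) =====
theorem findemail_spec : Claim_equal_findemail := by
  intro s _
  unfold Spec_findemail findemail findemail_alt
  obtain ⟨h', t', hs⟩ :=
    List.exists_cons_of_ne_nil (List.splitOnP_ne_nil (· == '>') s.toList)
  have hsplit : s.toList.splitOn '>' = s.toList.splitOnP (· == '>') := rfl
  have hfold := pvFoldl_step s.toList [] false
  have hmain := (pvMain s.toList).1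
  simp only [hsplit, hs] at *
  rw [hfold, hmain, pvIntercalate t' h']
  simp [List.headI, List.tail]
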